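-- pv_equiv track=rewrite | github.com/Champ1y/vkr | app/services/ingestion/parser.py | _normalize_code_text
-- ===== SOURCE A (Python) =====
-- def _normalize_code_text(text: str) -> str:
--     lines = [line.rstrip() for line in text.replace("\r\n", "\n").replace("\r", "\n").split("\n")]
--     while lines and not lines[0].strip():
--         lines.pop(0)
--     while lines and not lines[-1].strip():
--         lines.pop()
--
--     normalized: list[str] = []
--     blank_run = 0
--     for line in lines:
--         if line.strip():
--             blank_run = 0
--             normalized.append(line)
--             continue
--         blank_run += 1
--         if blank_run <= 1:
--             normalized.append("")
--
--     return "\n".join(normalized).strip()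
-- ===== SOURCE B (Python) =====
-- def _normalize_code_text(text: str) -> str:
--     lines = [line.rstrip() for line in text.replace("\r\n", "\n").replace("\r", "\n").split("\n")]
--     kept = [line for prev, line in zip([""] + lines, lines) if line or prev]
--     return "\n".join(kept).strip()
-- ===== Notes on version B (the rewrite author's own statement) =====
-- stated objective: simpler
-- what changed: Replaces A's two leading/trailing pop-loops and the blank_run counter fold by a single zip-with-predecessor comprehension (keep a line iff it is non-blank or its predecessor is non-blank) and lets the final strip() remove the leading/trailing blank material.
import Mathlib
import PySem

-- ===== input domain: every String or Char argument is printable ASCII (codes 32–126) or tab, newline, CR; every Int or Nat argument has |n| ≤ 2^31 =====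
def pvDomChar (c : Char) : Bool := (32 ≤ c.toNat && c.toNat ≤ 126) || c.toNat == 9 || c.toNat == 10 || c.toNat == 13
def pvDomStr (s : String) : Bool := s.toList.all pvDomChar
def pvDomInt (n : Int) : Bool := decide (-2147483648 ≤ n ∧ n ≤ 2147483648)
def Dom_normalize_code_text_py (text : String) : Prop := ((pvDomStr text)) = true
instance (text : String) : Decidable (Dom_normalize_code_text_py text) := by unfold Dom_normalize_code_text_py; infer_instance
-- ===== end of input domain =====

-- B replaces A's two blank-popping while-loops and blank_run counter by a single
-- zip-with-predecessor filter plus the final strip; return values proved equal.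

-- ===== PORT A =====
-- `while lines and not lines[0].strip(): lines.pop(0)`
def pvADropLeading : List (List Char) → List (List Char)
  | [] => []
  | l :: ls => if PySem.Chars.strip l = [] then pvADropLeading ls else l :: ls

-- `while lines and not lines[-1].strip(): lines.pop()` (structural recursion from the front)
def pvADropTrailing : List (List Char) → List (List Char)
  | [] => []
  | l :: ls =>
    match pvADropTrailing ls with
    | [] => if PySem.Chars.strip l = [] then [] else [l]
    | r => l :: r

def normalize_code_text_py (text : String) : String :=
  let lines := (PySem.Chars.splitOn
      (PySem.Chars.replace (PySem.Chars.replace text.toList ['\r', '\n'] ['\n']) ['\r'] ['\n'])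
      ['\n']).map PySem.Chars.rstrip
  let lines := pvADropTrailing (pvADropLeading lines)
  let res := lines.foldl
    (fun (acc : List (List Char) × Nat) line =>
      if ¬ PySem.Chars.strip line = [] then (acc.1 ++ [line], 0)
      else if acc.2 + 1 ≤ 1 then (acc.1 ++ [([] : List Char)], acc.2 + 1)
      else (acc.1, acc.2 + 1))
    ([], 0)
  String.ofList (PySem.Chars.strip (PySem.Chars.join ['\n'] res.1))

-- ===== PORT B =====
def normalize_code_text_py_alt (text : String) : String :=
  let lines := (PySem.Chars.splitOn
      (PySem.Chars.replace (PySem.Chars.replace text.toList ['\r', '\n'] ['\n']) ['\r'] ['\n'])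
      ['\n']).map PySem.Chars.rstrip
  let kept := ((List.zip (([] : List Char) :: lines) lines).filter
      (fun p => !p.2.isEmpty || !p.1.isEmpty)).map Prod.snd
  String.ofList (PySem.Chars.strip (PySem.Chars.join ['\n'] kept))

-- ===== PRECONDITION & SPEC =====
def Spec_normalize_code_text_py (text : String) (out : String) : Prop := out = normalize_code_text_py_alt text
instance (text : String) (out : String) : Decidable (Spec_normalize_code_text_py text out) := by unfold Spec_normalize_code_text_py; infer_instance

-- ===== CLAIM (what is proved, stated in full; the proofs are below) =====
def Claim_equal_normalize_code_text_py : Prop := ∀ (text : String), Dom_normalize_code_text_py text → Spec_normalize_code_text_py text (normalize_code_text_py text)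

-- ===== LEMMAS AND PROOFS =====

-- blank-collapsing kernel both pipelines reduce to; `pb` = "previous line was blank"
def pvCollapse : Bool → List (List Char) → List (List Char)
  | _, [] => []
  | pb, l :: ls =>
    if l.isEmpty then (if pb then pvCollapse true ls else [] :: pvCollapse true ls)
    else l :: pvCollapse false ls

-- drop-trailing-blanks with the plain `= []` blank test
def pvDropT : List (List Char) → List (List Char)
  | [] => []
  | l :: ls =>
    match pvDropT ls with
    | [] => if l.isEmpty then [] else [l]
    | r => l :: r

-- on rstripped lines the two blank tests coincide
def pvH (ls : List (List Char)) : Prop := ∀ l ∈ ls, (PySem.Chars.strip l = [] ↔ l = [])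

theorem pv_rstrip_nil_iff (cs : List Char) : PySem.Chars.rstrip cs = [] ↔ cs.all PySem.Chars.isspace := by
  simp [PySem.Chars.rstrip, List.dropWhile_eq_nil_iff, List.all_eq_true]

theorem pv_strip_nil_iff (cs : List Char) : PySem.Chars.strip cs = [] ↔ cs.all PySem.Chars.isspace := by
  rw [PySem.Chars.strip, pv_rstrip_nil_iff]
  simp only [PySem.Chars.lstrip, List.all_eq_true]
  constructor
  · intro h x hx
    have hsplit := List.takeWhile_append_dropWhile (p := PySem.Chars.isspace) (l := cs)
    rw [← hsplit] at hx
    rcases List.mem_append.mp hx with h1 | h2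
    · exact List.mem_takeWhile_imp h1
    · exact h _ h2
  · intro h x hx
    exact h _ ((List.dropWhile_sublist _).mem hx)

theorem pv_rstrip_idem (cs : List Char) :
    PySem.Chars.rstrip (PySem.Chars.rstrip cs) = PySem.Chars.rstrip cs := by
  simp [PySem.Chars.rstrip, List.dropWhile_idempotent]

theorem pv_strip_rstrip_nil_iff (cs : List Char) :
    PySem.Chars.strip (PySem.Chars.rstrip cs) = [] ↔ PySem.Chars.rstrip cs = [] := by
  rw [pv_strip_nil_iff, ← pv_rstrip_nil_iff, pv_rstrip_idem]

theorem pv_dropL_eq (ls : List (List Char)) (h : pvH ls) :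
    pvADropLeading ls = ls.dropWhile (·.isEmpty) := by
  induction ls with
  | nil => rfl
  | cons l t ih =>
    have hl := h l (by simp)
    have ih' := ih (fun x hx => h x (List.mem_cons_of_mem _ hx))
    rw [pvADropLeading, List.dropWhile_cons]
    by_cases hb : l = []
    · rw [if_pos (hl.mpr hb), if_pos (by simp [hb]), ih']
    · rw [if_neg (fun hc => hb (hl.mp hc)), if_neg (by simpa [List.isEmpty_iff] using hb)]

theorem pv_dropT_eq (ls : List (List Char)) (h : pvH ls) :
    pvADropTrailing ls = pvDropT ls := by
  induction ls with
  | nil => rfl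
  | cons l t ih =>
    have hl := h l (by simp)
    have ih' := ih (fun x hx => h x (List.mem_cons_of_mem _ hx))
    rw [pvADropTrailing, pvDropT, ih']
    rcases pvDropT t with _ | r
    · by_cases hb : l = []
      · rw [if_pos (hl.mpr hb), if_pos (by simp [hb])]
      · rw [if_neg (fun hc => hb (hl.mp hc)), if_neg (by simpa [List.isEmpty_iff] using hb)]
    · rfl

theorem pv_mem_dropT {l : List Char} {ls : List (List Char)} (h : l ∈ pvDropT ls) : l ∈ ls := by
  induction ls with
  | nil => simpa [pvDropT] using h
  | cons a t ih =>
    rw [pvDropT] at h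
    rcases hm : pvDropT t with _ | ⟨r, rs⟩ <;> rw [hm] at h
    · by_cases hb : a.isEmpty
      · simp [hb] at h
      · simp [hb] at h; simp [h]
    · rcases List.mem_cons.mp h with rfl | hx
      · simp
      · exact List.mem_cons_of_mem _ (ih (hm ▸ hx))

theorem pv_fold_inv (ls : List (List Char)) (h : pvH ls) (acc : List (List Char)) (run : Nat) :
    (ls.foldl
      (fun (acc : List (List Char) × Nat) line =>
        if ¬ PySem.Chars.strip line = [] then (acc.1 ++ [line], 0)
        else if acc.2 + 1 ≤ 1 then (acc.1 ++ [([] : List Char)], acc.2 + 1)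
        else (acc.1, acc.2 + 1))
      (acc, run)).1 = acc ++ pvCollapse (run != 0) ls := by
  induction ls generalizing acc run with
  | nil => simp [pvCollapse]
  | cons l t ih =>
    have hl := h l (by simp)
    have ih' := ih (fun x hx => h x (List.mem_cons_of_mem _ hx))
    rw [List.foldl_cons]
    by_cases hb : l = []
    · have hs : PySem.Chars.strip l = [] := hl.mpr hb
      subst hb
      show (List.foldl _ (if ¬ PySem.Chars.strip [] = [] then (acc ++ [[]], 0)
          else if run + 1 ≤ 1 then (acc ++ [([] : List Char)], run + 1) else (acc, run + 1)) t).1 = _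
      rw [if_neg (by simp [hs])]
      by_cases hr : run = 0
      · subst hr
        rw [if_pos (by omega), ih']
        simp [pvCollapse]
      · rw [if_neg (by omega), ih']
        have h2 : (run != 0) = true := by simpa using hr
        have h3 : (run + 1 != 0) = true := by simp
        rw [h2, h3]
        simp [pvCollapse]
    · have hs : ¬ PySem.Chars.strip l = [] := fun hc => hb (hl.mp hc)
      show (List.foldl _ (if ¬ PySem.Chars.strip l = [] then (acc ++ [l], 0)
          else if run + 1 ≤ 1 then (acc ++ [([] : List Char)], run + 1) else (acc, run + 1)) t).1 = _
      rw [if_pos hs, ih']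
      have : pvCollapse (run != 0) (l :: t) = l :: pvCollapse false t := by
        rw [pvCollapse, if_neg (by simpa [List.isEmpty_iff] using hb)]
      rw [this, List.append_assoc]
      rfl

theorem pv_zip_filter (p : List Char) (ls : List (List Char)) :
    ((List.zip (p :: ls) ls).filter (fun q => !q.2.isEmpty || !q.1.isEmpty)).map Prod.snd
      = pvCollapse p.isEmpty ls := by
  induction ls generalizing p with
  | nil => rfl
  | cons l t ih =>
    rw [List.zip_cons_cons, List.filter_cons]
    by_cases hl : l.isEmpty
    · have hl' : l = [] := List.isEmpty_iff.mp hl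
      subst hl'
      by_cases hp : p.isEmpty <;> simp [pvCollapse, hp, ih []]
    · by_cases hp : p.isEmpty <;> simp [pvCollapse, hl, hp, ih l]

theorem pv_collapse_true (ls : List (List Char)) :
    pvCollapse true ls = pvCollapse false (ls.dropWhile (·.isEmpty)) := by
  induction ls with
  | nil => rfl
  | cons l t ih =>
    by_cases hl : l.isEmpty
    · simp [pvCollapse, hl, ih]
    · simp [pvCollapse, hl]

theorem pv_dropT_nil_blank {ls : List (List Char)} (h : pvDropT ls = []) : ∀ l ∈ ls, l = [] := by
  induction ls with
  | nil => simp
  | cons l t ih =>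
    rw [pvDropT] at h
    rcases hm : pvDropT t with _ | ⟨r, rs⟩
    · rw [hm] at h
      by_cases hl : l.isEmpty
      · intro x hx
        rcases List.mem_cons.mp hx with rfl | hx
        · exact List.isEmpty_iff.mp hl
        · exact ih hm x hx
      · simp [hl] at h
    · rw [hm] at h; simp at h

theorem pv_collapse_blank {ls : List (List Char)} (h : ∀ l ∈ ls, l = []) :
    pvCollapse true ls = [] ∧ (pvCollapse false ls = [] ∨ pvCollapse false ls = [[]]) := by
  induction ls with
  | nil => simp [pvCollapse]
  | cons l t ih =>
    have hl : l = [] := h l (by simp)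
    have ih' := ih (fun x hx => h x (List.mem_cons_of_mem _ hx))
    subst hl
    simp [pvCollapse, ih'.1]

theorem pv_collapse_dropT (ls : List (List Char)) (pb : Bool) :
    pvCollapse pb ls = pvCollapse pb (pvDropT ls) ∨
    pvCollapse pb ls = pvCollapse pb (pvDropT ls) ++ [[]] := by
  induction ls generalizing pb with
  | nil => left; rfl
  | cons l t ih =>
    rcases hm : pvDropT t with _ | ⟨r, rs⟩
    · have hblank := pv_dropT_nil_blank hm
      have hc := pv_collapse_blank hblank
      by_cases hl : l.isEmpty
      · have hl' : l = [] := List.isEmpty_iff.mp hl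
        subst hl'
        rw [pvDropT, hm]
        simp only [pvCollapse, List.isEmpty_nil, if_true]
        cases pb with
        | true => left; simp [hc.1, pvCollapse]
        | false => right; simp [hc.1, pvCollapse]
      · rw [pvDropT, hm]
        simp only [pvCollapse, hl, if_neg, Bool.false_eq_true, not_false_iff]
        rcases hc.2 with h2 | h2
        · left; simp [pvCollapse, hl, h2]
        · right; simp [h2]
    · rw [pvDropT, hm]
      by_cases hl : l.isEmpty
      · have key : ∀ xs, pvCollapse pb (l :: xs)
            = if pb then pvCollapse true xs else [] :: pvCollapse true xs := by
          intro xs; rw [pvCollapse, if_pos hl]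
        rcases ih true with h2 | h2 <;> rw [hm] at h2
        · left; rw [key, key, h2]
        · right; rw [key, key, h2]; cases pb <;> simp
      · have key : ∀ xs, pvCollapse pb (l :: xs) = l :: pvCollapse false xs := by
          intro xs; rw [pvCollapse, if_neg (by simp [hl])]
        rcases ih false with h2 | h2 <;> rw [hm] at h2
        · left; rw [key, key, h2]
        · right; rw [key, key, h2]; rfl

theorem pv_join_append_nil (sep : List Char) (ys : List (List Char)) (hy : ys ≠ []) :
    PySem.Chars.join sep (ys ++ [[]]) = PySem.Chars.join sep ys ++ sep := by
  induction ys with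
  | nil => exact absurd rfl hy
  | cons y t ih =>
    rcases t with _ | ⟨y', t'⟩
    · rw [List.singleton_append, PySem.Chars.join_cons_cons, PySem.Chars.join_singleton,
        PySem.Chars.join_singleton, List.append_nil]
    · have ih' : PySem.Chars.join sep (y' :: (t' ++ [[]])) = PySem.Chars.join sep (y' :: t') ++ sep := by
        rw [← List.cons_append]; exact ih (by simp)
      rw [List.cons_append, List.cons_append, PySem.Chars.join_cons_cons, ih',
        PySem.Chars.join_cons_cons]
      simp

theorem pv_rstrip_append_nl (cs : List Char) :
    PySem.Chars.rstrip (cs ++ ['\n']) = PySem.Chars.rstrip cs := by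
  rw [PySem.Chars.rstrip, PySem.Chars.rstrip, List.reverse_append]
  show (List.dropWhile _ (['\n'].reverse ++ cs.reverse)).reverse = _
  rw [List.reverse_singleton, List.singleton_append, List.dropWhile_cons,
    if_pos (by decide : PySem.Chars.isspace '\n' = true)]

theorem pv_strip_append_nl (cs : List Char) :
    PySem.Chars.strip (cs ++ ['\n']) = PySem.Chars.strip cs := by
  rw [PySem.Chars.strip, PySem.Chars.strip, PySem.Chars.lstrip, PySem.Chars.lstrip,
    List.dropWhile_append]
  by_cases he : (List.dropWhile PySem.Chars.isspace cs).isEmpty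
  · rw [if_pos he]
    rw [List.isEmpty_iff] at he
    rw [he, List.dropWhile_cons, if_pos (by decide : PySem.Chars.isspace '\n' = true)]
    rfl
  · rw [if_neg he, pv_rstrip_append_nl]

theorem pv_join_strip_tail (ys : List (List Char)) :
    PySem.Chars.strip (PySem.Chars.join ['\n'] (ys ++ [[]])) = PySem.Chars.strip (PySem.Chars.join ['\n'] ys) := by
  rcases ys with _ | ⟨y, t⟩
  · rfl
  · rw [pv_join_append_nil _ _ (by simp), pv_strip_append_nl]

theorem pv_main (ls : List (List Char)) (H : pvH ls) :
    PySem.Chars.strip (PySem.Chars.join ['\n']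
      ((pvADropTrailing (pvADropLeading ls)).foldl
        (fun (acc : List (List Char) × Nat) line =>
          if ¬ PySem.Chars.strip line = [] then (acc.1 ++ [line], 0)
          else if acc.2 + 1 ≤ 1 then (acc.1 ++ [([] : List Char)], acc.2 + 1)
          else (acc.1, acc.2 + 1))
        ([], 0)).1)
    = PySem.Chars.strip (PySem.Chars.join ['\n']
      (((List.zip (([] : List Char) :: ls) ls).filter
        (fun p => !p.2.isEmpty || !p.1.isEmpty)).map Prod.snd)) := by
  have Hdw : pvH (ls.dropWhile (·.isEmpty)) :=
    fun x hx => H x ((List.dropWhile_sublist _).mem hx)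
  have HdT : pvH (pvDropT (ls.dropWhile (·.isEmpty))) :=
    fun x hx => Hdw x (pv_mem_dropT hx)
  rw [pv_dropL_eq ls H, pv_dropT_eq _ Hdw, pv_fold_inv _ HdT, pv_zip_filter]
  rw [show (([] : List Char).isEmpty) = true from rfl, pv_collapse_true]
  rw [show ((0 : Nat) != 0) = false from rfl, List.nil_append]
  rcases pv_collapse_dropT (ls.dropWhile (·.isEmpty)) false with h | h
  · rw [← h]
  · rw [← pv_join_strip_tail, ← h]

-- ===== VERDICT (by name: the statement is the Claim_ definition above) =====
theorem normalize_code_text_py_spec : Claim_equal_normalize_code_text_py := by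
  intro text _h
  show String.ofList _ = String.ofList _
  refine congrArg String.ofList (pv_main _ ?_)
  intro l hl
  rcases List.mem_map.mp hl with ⟨cs, _, rfl⟩
  exact pv_strip_rstrip_nil_iff cs
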